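-- pv_equiv track=rewrite | github.com/xzyozi/suudoku | suudoku.py | allowValue
-- ===== SOURCE A (Python) =====
-- from typing import List, Tuple, Any
--
-- def allowValue(
--             line: List[int]
--             ) -> List[int]:
--     result_list = []
--     for num in range(1,10):
--         if not num in line:
--             result_list.append(num)
--
--     return result_list
-- ===== SOURCE B (Python) =====
-- def allowValue(line):
--     remaining = list(range(1, 10))
--     for v in line:
--         remaining = [d for d in remaining if d != v]
--     return remaining
-- ===== Notes on version B (the rewrite author's own statement) =====
-- stated objective: alternative
-- what changed: Inverted the traversal: instead of looping over candidate digits 1..9 and testing each for membership in line, B makes a single pass over line, filtering each seen value out of a shrinking candidate list that starts as [1..9].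
import Mathlib
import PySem

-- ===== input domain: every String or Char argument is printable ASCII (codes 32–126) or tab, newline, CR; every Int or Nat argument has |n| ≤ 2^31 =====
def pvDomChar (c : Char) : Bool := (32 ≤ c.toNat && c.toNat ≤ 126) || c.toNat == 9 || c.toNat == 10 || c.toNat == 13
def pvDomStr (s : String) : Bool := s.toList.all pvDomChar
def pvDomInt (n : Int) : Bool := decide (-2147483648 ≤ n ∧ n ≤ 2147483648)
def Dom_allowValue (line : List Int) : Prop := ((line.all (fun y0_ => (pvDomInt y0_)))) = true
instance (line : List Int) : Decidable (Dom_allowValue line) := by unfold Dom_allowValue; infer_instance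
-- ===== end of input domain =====

-- B inverts the traversal: one pass over line shrinking a candidate list [1..9], instead of A's loop over candidates testing membership in line; alternative decomposition, same result.

-- ===== PORT A =====
def allowValue (line : List Int) : List Int :=
  (PySem.List.pyRange 1 10 1).foldl
    (fun result_list num => if !(line.contains num) then result_list ++ [num] else result_list)
    []

-- ===== PORT B =====
def allowValue_alt (line : List Int) : List Int :=
  line.foldl (fun remaining v => remaining.filter (fun d => !(d == v)))
    (PySem.List.pyRange 1 10 1)

-- ===== PRECONDITION & SPEC =====
def Spec_allowValue (line : List Int) (out : List Int) : Prop := out = allowValue_alt line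
instance (line : List Int) (out : List Int) : Decidable (Spec_allowValue line out) := by unfold Spec_allowValue; infer_instance

-- ===== CLAIM =====
def Claim_equal_allowValue : Prop := ∀ (line : List Int), Dom_allowValue line → Spec_allowValue line (allowValue line)

-- ===== LEMMAS AND PROOFS =====

theorem allowValue_eq_filter (line : List Int) :
    allowValue line = (PySem.List.pyRange 1 10 1).filter (fun x => !(line.contains x)) := by
  unfold allowValue
  rw [PySem.List.foldl_append_if_eq_filter]
  simp

-- One pass of successive per-element filters equals a single filter by non-membership.
theorem foldl_filter_eq_filter (line : List Int) :
    ∀ (l : List Int),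
      line.foldl (fun remaining v => remaining.filter (fun d => !(d == v))) l
        = l.filter (fun d => !(line.contains d)) := by
  induction line with
  | nil => intro l; simp
  | cons v vs ih =>
      intro l
      simp only [List.foldl_cons, ih, List.filter_filter]
      apply List.filter_congr
      intro d _
      by_cases h : d = v <;> simp [h]

theorem allowValue_alt_eq_filter (line : List Int) :
    allowValue_alt line = (PySem.List.pyRange 1 10 1).filter (fun x => !(line.contains x)) := by
  unfold allowValue_alt
  exact foldl_filter_eq_filter line _

-- ===== VERDICT =====
theorem allowValue_spec : Claim_equal_allowValue := by
  intro line _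
  unfold Spec_allowValue
  rw [allowValue_eq_filter, allowValue_alt_eq_filter]
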